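-- pv_equiv track=rewrite | github.com/pkch93/Algorithm | SW_Expert_Academy/level3/gns.py | solution
-- ===== SOURCE A (Python) =====
-- def solution(data):
--     """
--     SW Expert Academy 1221번 GNS - D3
--
--     어짜피 0 ~ 9까지의 숫자로 이뤄져있으므로 이 숫자들을 하나의 dict로 모은 다음 얼마나 존재하는지 counting함
--
--     :param data: 정렬되지 않은 어느 행성의 숫자들
--     :return: 어느 행성의 숫자로 정렬된 list
--     """
--     gns = {"ZRO": 0, "ONE": 1, "TWO": 2, "THR": 3, "FOR": 4, "FIV": 5, "SIX": 6, "SVN": 7, "EGT": 8, "NIN": 9}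
--     # dictionary로 어느 행성의 숫자를 정의
--     gns_keys = list(gns.keys())
--     count = [0 for _ in range(10)]  # counting을 위한 배열 초기화
--     answer = []
--     for s in data:
--         if s in gns:
--             count[gns[s]] += 1  # counting
--     for i in range(len(count)):
--         answer += [gns_keys[i]] * (count[i])
--         # counting된 값이 결국엔 해당 값이 있어야할 갯수이므로 count 배열을 돌면서 answer 배열에 추가
--     return answer
-- ===== SOURCE B (Python) =====
-- def solution(data):
--     gns = {"ZRO": 0, "ONE": 1, "TWO": 2, "THR": 3, "FOR": 4, "FIV": 5, "SIX": 6, "SVN": 7, "EGT": 8, "NIN": 9}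
--     return sorted((s for s in data if s in gns), key=gns.get)
-- ===== Notes on version B (the rewrite author's own statement) =====
-- stated objective: idiomatic
-- what changed: Replaces the counting-sort (10-slot count array plus a rebuild loop over the slots) with a direct comparison sort: filter the tokens present in the gns dict and sort them by their mapped digit.
import Mathlib
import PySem

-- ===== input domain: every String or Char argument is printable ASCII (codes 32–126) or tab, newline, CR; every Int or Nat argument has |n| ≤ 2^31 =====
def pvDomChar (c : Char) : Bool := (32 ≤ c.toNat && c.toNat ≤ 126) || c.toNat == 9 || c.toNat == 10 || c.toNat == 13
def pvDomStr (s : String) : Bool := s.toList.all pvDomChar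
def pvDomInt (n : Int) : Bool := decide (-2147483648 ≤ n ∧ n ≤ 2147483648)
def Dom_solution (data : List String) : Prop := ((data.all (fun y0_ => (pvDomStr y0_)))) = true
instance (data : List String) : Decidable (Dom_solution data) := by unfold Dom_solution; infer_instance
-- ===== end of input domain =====

-- B replaces A's counting sort (10-slot count array + rebuild loop) with an idiomatic
-- filter-then-comparison-sort keyed by the mapped digit; equivalence of return values is proved.


-- ===== PORT A =====
-- the gns dict literal of A
def gnsA : PySem.Dict String Int :=
  PySem.Dict.ofList [("ZRO",0),("ONE",1),("TWO",2),("THR",3),("FOR",4),("FIV",5),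
                     ("SIX",6),("SVN",7),("EGT",8),("NIN",9)]

-- loop body of A's counting loop: 'if s in gns: count[gns[s]] += 1'
-- (the index gns[s] is one of 0..9, always in range of the 10-slot list)
def solutionStep (c : List Int) (s : String) : List Int :=
  match gnsA.get? s with
  | some v => c.modify v.toNat (· + 1)
  | none => c

def solution (data : List String) : List String :=
  let gns_keys := gnsA.keys
  let count : List Int := (PySem.List.pyRange 0 10 1).map (fun _ => (0 : Int))
  let count := data.foldl solutionStep count
  (PySem.List.pyRange 0 (count.length) 1).foldl
    (fun answer i =>
      answer ++ List.replicate (PySem.List.pyGetD count i 0).toNat (PySem.List.pyGetD gns_keys i ""))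
    []

-- ===== PORT B =====
def gnsB : PySem.Dict String Int :=
  PySem.Dict.ofList [("ZRO",0),("ONE",1),("TWO",2),("THR",3),("FOR",4),("FIV",5),
                     ("SIX",6),("SVN",7),("EGT",8),("NIN",9)]

-- sorted((s for s in data if s in gns), key=gns.get); every surviving token is a key of gns,
-- so the key gns.get is its int value ((get? s).getD 0 reads that value)
def solution_alt (data : List String) : List String :=
  PySem.List.sorted (data.filter (fun s => (gnsB.get? s).isSome))
    (fun s => (gnsB.get? s).getD 0)

-- ===== PRECONDITION & SPEC =====
def Spec_solution (data : List String) (out : List String) : Prop := out = solution_alt data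
instance (data : List String) (out : List String) : Decidable (Spec_solution data out) := by unfold Spec_solution; infer_instance

-- ===== CLAIM (what is proved, stated in full; the proofs are below) =====
def Claim_equal_solution : Prop := ∀ (data : List String), Dom_solution data → Spec_solution data (solution data)

-- ===== LEMMAS AND PROOFS =====
def pvKeys : List String := ["ZRO","ONE","TWO","THR","FOR","FIV","SIX","SVN","EGT","NIN"]

-- the canonical result both programs compute: each key, repeated as often as it occurs
def pvF (xs : List String) : List String :=
  (pvKeys.map (fun w => List.replicate (xs.count w) w)).flatten

lemma keys_items : ∀ p ∈ gnsA.items, p.1 ∈ pvKeys := by decide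

lemma get?_none (s : String) (hs : s ∉ pvKeys) : gnsA.get? s = none := by
  have h : ∀ p ∈ gnsA.items, ¬ (p.1 == s) = true := by
    intro p hp hbeq
    exact hs (beq_iff_eq.mp hbeq ▸ keys_items p hp)
  simp [PySem.Dict.get?, List.find?_eq_none.2 h]

lemma mem_of_get?_isSome (s : String) (h : (gnsA.get? s).isSome) : s ∈ pvKeys := by
  by_contra hc
  rw [get?_none s hc] at h
  simp at h

lemma step_map (g : String → Int) (s : String) :
    solutionStep (pvKeys.map g) s = pvKeys.map (fun w => g w + if s == w then 1 else 0) := by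
  by_cases hmem : s ∈ pvKeys
  · have : s = "ZRO" ∨ s = "ONE" ∨ s = "TWO" ∨ s = "THR" ∨ s = "FOR" ∨ s = "FIV" ∨ s = "SIX" ∨ s = "SVN" ∨ s = "EGT" ∨ s = "NIN" := by
      simpa [pvKeys] using hmem
    rcases this with rfl|rfl|rfl|rfl|rfl|rfl|rfl|rfl|rfl|rfl <;>
      simp [solutionStep, show gnsA.get? "ZRO" = some 0 from by decide,
        show gnsA.get? "ONE" = some 1 from by decide, show gnsA.get? "TWO" = some 2 from by decide,
        show gnsA.get? "THR" = some 3 from by decide, show gnsA.get? "FOR" = some 4 from by decide,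
        show gnsA.get? "FIV" = some 5 from by decide, show gnsA.get? "SIX" = some 6 from by decide,
        show gnsA.get? "SVN" = some 7 from by decide, show gnsA.get? "EGT" = some 8 from by decide,
        show gnsA.get? "NIN" = some 9 from by decide, pvKeys, List.modify]
  · have h2 : ∀ w ∈ pvKeys, (s == w) = false := by
      intro w hw
      exact beq_eq_false_iff_ne.mpr (fun e => hmem (e ▸ hw))
    simp only [solutionStep, get?_none s hmem]
    apply List.map_congr_left
    intro w hw
    rw [h2 w hw]
    simp

lemma fold_count (xs : List String) (g : String → Int) :
    xs.foldl solutionStep (pvKeys.map g) = pvKeys.map (fun w => g w + (xs.count w : Int)) := by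
  induction xs generalizing g with
  | nil => simp
  | cons s xs ih =>
      rw [List.foldl_cons, step_map, ih]
      apply List.map_congr_left
      intro w _
      rw [List.count_cons]
      by_cases h : s == w
      · simp [h]; ring
      · simp [h]

lemma A_eq (data : List String) : solution data = pvF data := by
  unfold solution
  dsimp only
  rw [show (PySem.List.pyRange 0 10 1).map (fun _ => (0:Int)) = pvKeys.map (fun _ => (0:Int)) from by decide]
  rw [fold_count]
  rw [show ((pvKeys.map (fun w => (0:Int) + (data.count w : Int))).length : Int) = 10 from by simp [pvKeys]]
  rw [show PySem.List.pyRange 0 10 1 = [0,1,2,3,4,5,6,7,8,9] from by decide]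
  rw [show gnsA.keys = pvKeys from by decide]
  simp [pvKeys, pvF, List.foldl, PySem.List.pyGetD, PySem.List.pyGet?, PySem.List.pyIdx?]

lemma perm_F (data : List String) :
    (pvF data).Perm (data.filter (fun s => (gnsB.get? s).isSome)) := by
  rw [List.perm_iff_count]
  intro a
  unfold pvF
  rw [List.count_flatten, List.map_map]
  by_cases ha : a ∈ pvKeys
  · have : a = "ZRO" ∨ a = "ONE" ∨ a = "TWO" ∨ a = "THR" ∨ a = "FOR" ∨ a = "FIV" ∨ a = "SIX" ∨ a = "SVN" ∨ a = "EGT" ∨ a = "NIN" := by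
      simpa [pvKeys] using ha
    rcases this with rfl|rfl|rfl|rfl|rfl|rfl|rfl|rfl|rfl|rfl <;>
      rw [List.count_filter (by decide)] <;>
      simp [pvKeys, List.count_replicate]
  · have hnone : gnsA.get? a = none := get?_none a ha
    have hfil : List.count a (data.filter (fun s => (gnsB.get? s).isSome)) = 0 := by
      rw [List.count_eq_zero]
      intro hmem
      rw [List.mem_filter] at hmem
      rw [show gnsB = gnsA from rfl, hnone] at hmem
      simp at hmem
    rw [hfil]
    apply List.sum_eq_zero
    intro x hx
    rw [List.mem_map] at hx
    obtain ⟨w, hw, rfl⟩ := hx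
    simp only [Function.comp]
    rw [List.count_replicate, if_neg]
    intro hbeq
    exact ha (beq_iff_eq.mp hbeq ▸ hw)

lemma pv_anti : ∀ a ∈ pvKeys, ∀ b ∈ pvKeys, ((gnsB.get? a).getD 0 : Int) ≤ (gnsB.get? b).getD 0 →
    ((gnsB.get? b).getD 0 : Int) ≤ (gnsB.get? a).getD 0 → a = b := by decide

lemma B_eq (data : List String) : solution_alt data = pvF data := by
  unfold solution_alt
  apply List.Perm.eq_of_pairwise
  · intro a b hasort hbF hab hba
    have haK : a ∈ pvKeys := by
      have := (PySem.List.mem_sorted _ _ _ a).mp hasort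
      rw [List.mem_filter] at this
      exact mem_of_get?_isSome a (by simpa using this.2)
    have hbK : b ∈ pvKeys := by
      unfold pvF at hbF
      rw [List.mem_flatten] at hbF
      obtain ⟨l, hl, hbl⟩ := hbF
      rw [List.mem_map] at hl
      obtain ⟨w, hw, rfl⟩ := hl
      exact (List.eq_of_mem_replicate hbl) ▸ hw
    exact pv_anti a haK b hbK hab hba
  · exact PySem.List.sorted_pairwise _ _
  · unfold pvF
    rw [List.pairwise_flatten]
    constructor
    · intro l hl
      rw [List.mem_map] at hl
      obtain ⟨w, _, rfl⟩ := hl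
      exact List.pairwise_replicate.mpr (Or.inr (le_refl _))
    · rw [List.pairwise_map]
      have base : List.Pairwise (fun w1 w2 : String => ((gnsB.get? w1).getD 0 : Int) ≤ (gnsB.get? w2).getD 0) pvKeys := by decide
      apply base.imp
      intro w1 w2 h x hx y hy
      rw [List.eq_of_mem_replicate hx, List.eq_of_mem_replicate hy]
      exact h
  · exact (PySem.List.sorted_perm _ _ _).trans (perm_F data).symm

-- ===== VERDICT (by name: the statement is the Claim_ definition above) =====
theorem solution_spec : Claim_equal_solution := by
  intro data _
  unfold Spec_solution
  rw [A_eq, B_eq]
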